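-- pv_equiv track=rewrite | github.com/YDD9/cs-study | graph/even tree.py | cuts_even2
-- ===== SOURCE A (Python) =====
-- def nb_nodes2(t, node):
--     stack =[node]
--     nb = 0
--     tmp = t.copy()
--     while stack:
--         cur = stack.pop()
--         nb += 1
--         if cur in tmp:
--             stack.extend(tmp.pop(cur))
--     return nb
--
-- def cuts_even2(t, root):
--     stack = [root]
--     cut = 0
--     tmp = t.copy()
--     while stack:
--         cur = stack.pop()
--         if nb_nodes2(tmp, cur) % 2 == 0:
--             cut += 1
--         if cur in tmp:
--             stack.extend(tmp.pop(cur))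
--     return cut-1
-- ===== SOURCE B (Python) =====
-- def cuts_even2(t, root):
--     # One DFS instead of a fresh counting traversal per node:
--     # pass 1 records, for each pop of A's outer loop, how many children were
--     # expanded; pass 2 folds that record back-to-front, rebuilding every
--     # subtree size with a size stack and counting the even ones.
--     tmp = t.copy()
--     events = []
--     stack = [root]
--     while stack:
--         cur = stack.pop()
--         kids = tmp.pop(cur, None)
--         if kids is None:
--             events.append(0)
--         else:
--             events.append(len(kids))
--             stack.extend(kids)
--     cut = 0
--     sizes = []
--     for k in reversed(events):
--         s = 1
--         for _ in range(k):
--             s += sizes.pop()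
--         if s % 2 == 0:
--             cut += 1
--         sizes.append(s)
--     return cut - 1
-- ===== Notes on version B (the rewrite author's own statement) =====
-- stated objective: alternative
-- what changed: A recounts the whole remaining subtree with a fresh DFS (nb_nodes2) for every popped node; B does one DFS recording how many children each pop expanded, then one backward fold over that record rebuilding every subtree size with a stack and counting the even ones.
import Mathlib
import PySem

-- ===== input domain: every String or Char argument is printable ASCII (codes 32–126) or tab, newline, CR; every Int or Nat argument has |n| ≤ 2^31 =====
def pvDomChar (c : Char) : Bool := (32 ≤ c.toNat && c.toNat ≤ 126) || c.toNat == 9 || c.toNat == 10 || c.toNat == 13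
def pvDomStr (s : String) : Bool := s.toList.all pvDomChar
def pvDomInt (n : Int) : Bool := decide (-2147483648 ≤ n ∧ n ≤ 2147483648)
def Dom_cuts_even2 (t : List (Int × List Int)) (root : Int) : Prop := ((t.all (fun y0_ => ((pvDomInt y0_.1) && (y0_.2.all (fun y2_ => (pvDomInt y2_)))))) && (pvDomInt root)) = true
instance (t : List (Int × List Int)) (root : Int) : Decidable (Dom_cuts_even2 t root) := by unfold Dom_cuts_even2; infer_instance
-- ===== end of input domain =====

-- B replaces A's per-node counting traversal by one DFS pass recording
-- expansion events plus one backward fold over them rebuilding all subtree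
-- sizes; objective: alternative (single-pass instead of nested traversals).

-- termination helper for the loops below (cited by decreasing_by): a successful
-- tmp.pop(cur) strictly shrinks the dict
theorem pv_pop_size_lt {d d' : PySem.Dict Int (List Int)} {x : Int} {v : List Int}
    (h : d.pop? x = some (v, d')) : d'.size < d.size := by
  unfold PySem.Dict.pop? at h
  cases hg : d.get? x with
  | none => simp [hg] at h
  | some w =>
    simp [hg] at h
    obtain ⟨-, h2⟩ := h
    subst h2
    unfold PySem.Dict.erase PySem.Dict.size
    refine List.length_filter_lt_length_iff_exists.2 ?_
    unfold PySem.Dict.get? at hg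
    cases hf : List.find? (fun p => p.1 == x) d.items with
    | none => simp [hf] at hg
    | some p =>
      refine ⟨p, List.mem_of_find?_eq_some hf, ?_⟩
      have := List.find?_some hf
      simp [this]

-- ===== PORT A =====
-- Python stacks are represented top-first: stack.pop() is the head, and
-- stack.extend(kids) makes the LAST kid the next pop, i.e. kids.reverse ++ rest.
-- 'if cur in tmp: … tmp.pop(cur)' is ported as matching on Dict.pop?.
-- 'nb % 2' : nb ≥ 0 here and the divisor is 2 > 0, where Int.emod = Python %.

-- the while-loop of nb_nodes2 (nb_nodes2(t, node) = nbLoop t [node] 0; t.copy() is t)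
def nbLoop (tmp : PySem.Dict Int (List Int)) (stack : List Int) (nb : Int) : Int :=
  match stack with
  | [] => nb
  | cur :: rest =>
    match h : tmp.pop? cur with
    | none => nbLoop tmp rest (nb + 1)
    | some (kids, tmp') => nbLoop tmp' (kids.reverse ++ rest) (nb + 1)
termination_by (tmp.size, stack.length)
decreasing_by
  · exact Prod.Lex.right _ (Nat.lt_succ_self _)
  · exact Prod.Lex.left _ _ (pv_pop_size_lt h)

-- the while-loop of cuts_even2
def cutLoop (tmp : PySem.Dict Int (List Int)) (stack : List Int) (cut : Int) : Int :=
  match stack with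
  | [] => cut
  | cur :: rest =>
    let cut' := if nbLoop tmp [cur] 0 % 2 == 0 then cut + 1 else cut
    match h : tmp.pop? cur with
    | none => cutLoop tmp rest cut'
    | some (kids, tmp') => cutLoop tmp' (kids.reverse ++ rest) cut'
termination_by (tmp.size, stack.length)
decreasing_by
  · exact Prod.Lex.right _ (Nat.lt_succ_self _)
  · exact Prod.Lex.left _ _ (pv_pop_size_lt h)

def cuts_even2 (t : List (Int × List Int)) (root : Int) : Int :=
  cutLoop (PySem.Dict.ofList t) [root] 0 - 1

-- ===== PORT B =====
-- Pass 1 of Source B: events is built by .append and later read with reversed(...),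
-- so the port accumulates it by cons (acc holds the events newest-first, which
-- is exactly the order phase2 consumes). 'tmp.pop(cur, None)' is Dict.pop?.
def evLoop (tmp : PySem.Dict Int (List Int)) (stack : List Int) (acc : List Nat) : List Nat :=
  match stack with
  | [] => acc
  | cur :: rest =>
    match h : tmp.pop? cur with
    | none => evLoop tmp rest (0 :: acc)
    | some (kids, tmp') => evLoop tmp' (kids.reverse ++ rest) (kids.length :: acc)
termination_by (tmp.size, stack.length)
decreasing_by
  · exact Prod.Lex.right _ (Nat.lt_succ_self _)
  · exact Prod.Lex.left _ _ (pv_pop_size_lt h)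

-- 's = 1; for _ in range(k): s += sizes.pop()' — sizes is also kept top-first.
-- (the [] case with k > 0 is Python's IndexError; Source B never reaches it)
def popSum (k : Nat) (s : Int) (sizes : List Int) : Int × List Int :=
  match k, sizes with
  | 0, sizes => (s, sizes)
  | _ + 1, [] => (s, [])
  | k + 1, x :: rest => popSum k (s + x) rest

-- pass 2 of Source B: 'for k in reversed(events): …'
def phase2 (events : List Nat) (sizes : List Int) (cut : Int) : Int :=
  match events with
  | [] => cut
  | k :: rest =>
    let r := popSum k 1 sizes
    phase2 rest (r.1 :: r.2) (if r.1 % 2 == 0 then cut + 1 else cut)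

def cuts_even2_alt (t : List (Int × List Int)) (root : Int) : Int :=
  phase2 (evLoop (PySem.Dict.ofList t) [root] []) [] 0 - 1

-- ===== PRECONDITION & SPEC =====
def Spec_cuts_even2 (t : List (Int × List Int)) (root : Int) (out : Int) : Prop := out = cuts_even2_alt t root
instance (t : List (Int × List Int)) (root : Int) (out : Int) : Decidable (Spec_cuts_even2 t root out) := by unfold Spec_cuts_even2; infer_instance

-- ===== CLAIM (what is proved, stated in full; the proofs are below) =====
def Claim_equal_cuts_even2 : Prop := ∀ (t : List (Int × List Int)) (root : Int), Dom_cuts_even2 t root → Spec_cuts_even2 t root (cuts_even2 t root)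

-- ===== LEMMAS AND PROOFS =====

-- reference machinery: the final dict and the event trace of the common DFS loop
def runD (d : PySem.Dict Int (List Int)) (s : List Int) : PySem.Dict Int (List Int) :=
  match s with
  | [] => d
  | cur :: rest =>
    match h : d.pop? cur with
    | none => runD d rest
    | some (kids, d') => runD d' (kids.reverse ++ rest)
termination_by (d.size, s.length)
decreasing_by
  · exact Prod.Lex.right _ (Nat.lt_succ_self _)
  · exact Prod.Lex.left _ _ (pv_pop_size_lt h)

def trace (d : PySem.Dict Int (List Int)) (s : List Int) : List Nat :=
  match s with
  | [] => []
  | cur :: rest =>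
    match h : d.pop? cur with
    | none => 0 :: trace d rest
    | some (kids, d') => kids.length :: trace d' (kids.reverse ++ rest)
termination_by (d.size, s.length)
decreasing_by
  · exact Prod.Lex.right _ (Nat.lt_succ_self _)
  · exact Prod.Lex.left _ _ (pv_pop_size_lt h)

-- unfolding equations for the four DFS loops (the match binds its scrutinee
-- dependently, so each case is stated once here and cited by name)
theorem nbLoop_nil (d : PySem.Dict Int (List Int)) (nb : Int) : nbLoop d [] nb = nb := by
  rw [nbLoop]

theorem nbLoop_cons_none {d : PySem.Dict Int (List Int)} {cur : Int} (rest : List Int) (nb : Int)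
    (h : d.pop? cur = none) : nbLoop d (cur :: rest) nb = nbLoop d rest (nb + 1) := by
  rw [nbLoop]; split <;> simp_all

theorem nbLoop_cons_some {d tmp' : PySem.Dict Int (List Int)} {cur : Int} {kids : List Int}
    (rest : List Int) (nb : Int) (h : d.pop? cur = some (kids, tmp')) :
    nbLoop d (cur :: rest) nb = nbLoop tmp' (kids.reverse ++ rest) (nb + 1) := by
  rw [nbLoop]; split <;> simp_all

theorem cutLoop_nil (d : PySem.Dict Int (List Int)) (c : Int) : cutLoop d [] c = c := by
  rw [cutLoop]

theorem cutLoop_cons_none {d : PySem.Dict Int (List Int)} {cur : Int} (rest : List Int) (c : Int)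
    (h : d.pop? cur = none) : cutLoop d (cur :: rest) c
      = cutLoop d rest (if nbLoop d [cur] 0 % 2 == 0 then c + 1 else c) := by
  rw [cutLoop]; split <;> simp_all

theorem cutLoop_cons_some {d tmp' : PySem.Dict Int (List Int)} {cur : Int} {kids : List Int}
    (rest : List Int) (c : Int) (h : d.pop? cur = some (kids, tmp')) :
    cutLoop d (cur :: rest) c
      = cutLoop tmp' (kids.reverse ++ rest) (if nbLoop d [cur] 0 % 2 == 0 then c + 1 else c) := by
  rw [cutLoop]; split <;> simp_all

theorem evLoop_nil (d : PySem.Dict Int (List Int)) (acc : List Nat) : evLoop d [] acc = acc := by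
  rw [evLoop]

theorem evLoop_cons_none {d : PySem.Dict Int (List Int)} {cur : Int} (rest : List Int)
    (acc : List Nat) (h : d.pop? cur = none) :
    evLoop d (cur :: rest) acc = evLoop d rest (0 :: acc) := by
  rw [evLoop]; split <;> simp_all

theorem evLoop_cons_some {d tmp' : PySem.Dict Int (List Int)} {cur : Int} {kids : List Int}
    (rest : List Int) (acc : List Nat) (h : d.pop? cur = some (kids, tmp')) :
    evLoop d (cur :: rest) acc = evLoop tmp' (kids.reverse ++ rest) (kids.length :: acc) := by
  rw [evLoop]; split <;> simp_all

theorem runD_nil (d : PySem.Dict Int (List Int)) : runD d [] = d := by rw [runD]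

theorem runD_cons_none {d : PySem.Dict Int (List Int)} {cur : Int} (rest : List Int)
    (h : d.pop? cur = none) : runD d (cur :: rest) = runD d rest := by
  rw [runD]; split <;> simp_all

theorem runD_cons_some {d d' : PySem.Dict Int (List Int)} {cur : Int} {kids : List Int}
    (rest : List Int) (h : d.pop? cur = some (kids, d')) :
    runD d (cur :: rest) = runD d' (kids.reverse ++ rest) := by
  rw [runD]; split <;> simp_all

theorem trace_nil (d : PySem.Dict Int (List Int)) : trace d [] = [] := by rw [trace]

theorem trace_cons_none {d : PySem.Dict Int (List Int)} {cur : Int} (rest : List Int)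
    (h : d.pop? cur = none) : trace d (cur :: rest) = 0 :: trace d rest := by
  rw [trace]; split <;> simp_all

theorem trace_cons_some {d d' : PySem.Dict Int (List Int)} {cur : Int} {kids : List Int}
    (rest : List Int) (h : d.pop? cur = some (kids, d')) :
    trace d (cur :: rest) = kids.length :: trace d' (kids.reverse ++ rest) := by
  rw [trace]; split <;> simp_all

theorem nbLoop_eq_trace : ∀ (d : PySem.Dict Int (List Int)) (s : List Int) (nb : Int),
    nbLoop d s nb = nb + ((trace d s).length : Int) := by
  intro d s
  induction d, s using trace.induct with
  | case1 d => intro nb; simp [nbLoop_nil, trace_nil]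
  | case2 d cur rest h ih =>
    intro nb; rw [nbLoop_cons_none rest nb h, trace_cons_none rest h, ih]
    push_cast [List.length_cons]; ring
  | case3 d cur rest kids d' h ih =>
    intro nb; rw [nbLoop_cons_some rest nb h, trace_cons_some rest h, ih]
    push_cast [List.length_cons]; ring

theorem evLoop_eq_trace : ∀ (d : PySem.Dict Int (List Int)) (s : List Int) (acc : List Nat),
    evLoop d s acc = (trace d s).reverse ++ acc := by
  intro d s
  induction d, s using trace.induct with
  | case1 d => intro acc; simp [evLoop_nil, trace_nil]
  | case2 d cur rest h ih =>
    intro acc; rw [evLoop_cons_none rest acc h, trace_cons_none rest h, ih]; simp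
  | case3 d cur rest kids d' h ih =>
    intro acc
    rw [evLoop_cons_some rest acc h, trace_cons_some rest h, ih]; simp

theorem runD_append : ∀ (d : PySem.Dict Int (List Int)) (a b : List Int),
    runD d (a ++ b) = runD (runD d a) b := by
  intro d a
  induction d, a using runD.induct with
  | case1 d => intro b; rw [runD_nil]; simp
  | case2 d cur rest h ih =>
    intro b
    rw [List.cons_append, runD_cons_none (rest ++ b) h, runD_cons_none rest h]
    exact ih b
  | case3 d cur rest kids d' h ih =>
    intro b
    rw [List.cons_append, runD_cons_some (rest ++ b) h, runD_cons_some rest h,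
      ← List.append_assoc]
    exact ih b

theorem trace_append : ∀ (d : PySem.Dict Int (List Int)) (a b : List Int),
    trace d (a ++ b) = trace d a ++ trace (runD d a) b := by
  intro d a
  induction d, a using runD.induct with
  | case1 d => intro b; rw [trace_nil, runD_nil]; simp
  | case2 d cur rest h ih =>
    intro b
    rw [List.cons_append, trace_cons_none (rest ++ b) h, trace_cons_none rest h,
      runD_cons_none rest h, ih]
    simp
  | case3 d cur rest kids d' h ih =>
    intro b
    rw [List.cons_append, trace_cons_some (rest ++ b) h, trace_cons_some rest h,
      runD_cons_some rest h, ← List.append_assoc, ih]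
    simp

-- sizes of the top-level stack entries, each as A's nb_nodes2 would count it
def szList (d : PySem.Dict Int (List Int)) (s : List Int) : List Int :=
  match s with
  | [] => []
  | x :: rest => ((trace d [x]).length : Int) :: szList (runD d [x]) rest

theorem length_szList (s : List Int) : ∀ (d : PySem.Dict Int (List Int)),
    (szList d s).length = s.length := by
  induction s with
  | nil => intro d; simp [szList]
  | cons x rest ih => intro d; simp [szList, ih]

theorem sum_szList (s : List Int) : ∀ (d : PySem.Dict Int (List Int)),
    (szList d s).sum = ((trace d s).length : Int) := by
  induction s with
  | nil => intro d; simp [szList, trace_nil]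
  | cons x rest ih =>
    intro d
    rw [szList, List.sum_cons, ih]
    have hx : x :: rest = [x] ++ rest := rfl
    conv_rhs => rw [hx, trace_append]
    push_cast [List.length_append]; ring

theorem szList_append (a : List Int) : ∀ (d : PySem.Dict Int (List Int)) (b : List Int),
    szList d (a ++ b) = szList d a ++ szList (runD d a) b := by
  induction a with
  | nil => intro d b; simp [szList, runD_nil]
  | cons x a' ih =>
    intro d b
    rw [List.cons_append]
    show szList d (x :: (a' ++ b)) = _
    rw [szList, szList, ih]
    have hx : x :: a' = [x] ++ a' := rfl
    rw [hx, runD_append]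
    simp

theorem popSum_spec (L : List Int) : ∀ (M : List Int) (s : Int),
    popSum L.length s (L ++ M) = (s + L.sum, M) := by
  induction L with
  | nil => intro M s; simp [popSum]
  | cons x L ih =>
    intro M s
    rw [List.length_cons, List.cons_append]
    show popSum (L.length + 1) s (x :: (L ++ M)) = _
    rw [popSum, ih]
    simp; ring

-- the step-by-step state of phase2 (sizes stack, cut) after a list of events
def p2run (events : List Nat) (st : List Int × Int) : List Int × Int :=
  match events with
  | [] => st
  | k :: rest =>
    let r := popSum k 1 st.1
    p2run rest (r.1 :: r.2, if r.1 % 2 == 0 then st.2 + 1 else st.2)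

theorem phase2_eq_p2run (events : List Nat) : ∀ (sizes : List Int) (cut : Int),
    phase2 events sizes cut = (p2run events (sizes, cut)).2 := by
  induction events with
  | nil => intro sizes cut; simp [phase2, p2run]
  | cons k rest ih => intro sizes cut; rw [phase2, p2run]; exact ih _ _

theorem p2run_append (A : List Nat) : ∀ (B : List Nat) (st : List Int × Int),
    p2run (A ++ B) st = p2run B (p2run A st) := by
  induction A with
  | nil => intro B st; simp [p2run]
  | cons k A ih => intro B st; rw [List.cons_append, p2run, p2run]; exact ih _ _

theorem cutLoop_add : ∀ (d : PySem.Dict Int (List Int)) (s : List Int) (c e : Int),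
    cutLoop d s (c + e) = cutLoop d s c + e := by
  intro d s
  induction d, s using trace.induct with
  | case1 d => intro c e; simp [cutLoop_nil]
  | case2 d cur rest h ih =>
    intro c e
    rw [cutLoop_cons_none rest _ h, cutLoop_cons_none rest _ h]
    split
    · rw [show c + e + 1 = (c + 1) + e by ring, ih]
    · rw [ih]
  | case3 d cur rest kids d' h ih =>
    intro c e
    rw [cutLoop_cons_some rest _ h, cutLoop_cons_some rest _ h]
    split
    · rw [show c + e + 1 = (c + 1) + e by ring, ih]
    · rw [ih]

-- KEY LEMMA: running phase2's fold over the reversed trace of a stack rebuilds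
-- exactly the per-entry sizes and A's cut count.
theorem p2run_trace : ∀ (d : PySem.Dict Int (List Int)) (s : List Int)
    (sz : List Int) (c : Int),
    p2run ((trace d s).reverse) (sz, c) = (szList d s ++ sz, cutLoop d s c) := by
  intro d s
  induction d, s using trace.induct with
  | case1 d => intro sz c; simp [trace_nil, szList, cutLoop_nil, p2run]
  | case2 d cur rest h ih =>
    intro sz c
    rw [trace_cons_none rest h, List.reverse_cons, p2run_append, ih]
    have h1 : trace d [cur] = [0] := by rw [trace_cons_none [] h, trace_nil]
    have h2 : runD d [cur] = d := by rw [runD_cons_none [] h, runD_nil]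
    have h3 : nbLoop d [cur] 0 = 1 := by rw [nbLoop_eq_trace, h1]; simp
    rw [cutLoop_cons_none rest _ h, h3, szList, h1, h2]
    norm_num [p2run, popSum]
  | case3 d cur rest kids d' h ih =>
    intro sz c
    rw [trace_cons_some rest h, List.reverse_cons, p2run_append, ih, p2run]
    have h1 : trace d [cur] = kids.length :: trace d' kids.reverse := by
      rw [trace_cons_some [] h]; simp
    have h2 : runD d [cur] = runD d' kids.reverse := by
      rw [runD_cons_some [] h]; simp
    have hlen : kids.length = (szList d' kids.reverse).length := by
      rw [length_szList]; simp
    have hpop : popSum kids.length 1 (szList d' (kids.reverse ++ rest) ++ sz)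
        = (1 + (szList d' kids.reverse).sum, szList (runD d' kids.reverse) rest ++ sz) := by
      rw [szList_append, List.append_assoc, hlen]
      exact popSum_spec _ _ _
    have hs : (1 : Int) + (szList d' kids.reverse).sum = ((trace d [cur]).length : Int) := by
      rw [sum_szList, h1, List.length_cons]; push_cast; ring
    have hnb : nbLoop d [cur] 0 = ((trace d [cur]).length : Int) := by
      rw [nbLoop_eq_trace]; ring
    simp only [hpop, hs]
    rw [cutLoop_cons_some rest _ h, hnb]
    rw [szList, h2]
    split
    · rw [← cutLoop_add, p2run]; simp
    · rw [p2run]; simp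

-- ===== VERDICT (by name: the statement is the Claim_ definition above) =====
theorem cuts_even2_spec : Claim_equal_cuts_even2 := by
  intro t root _
  unfold Spec_cuts_even2 cuts_even2 cuts_even2_alt
  rw [evLoop_eq_trace, List.append_nil, phase2_eq_p2run, p2run_trace]
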